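-- pv_equiv track=rewrite | github.com/devlotfi/game-theory-solver | public/main.py | trouver_optimums_pareto
-- ===== SOURCE A (Python) =====
-- def trouver_optimums_pareto(
--     table_gains: list[list[tuple[int, int]]],
-- ) -> list[tuple[int, int]]:
--     nb_strategies_j1 = len(table_gains)
--     nb_strategies_j2 = len(table_gains[0])
--     pareto_optima = []
--
--     for i in range(nb_strategies_j1):
--         for j in range(nb_strategies_j2):
--             gain_ij = table_gains[i][j]
--             est_domine = False
--
--             for x in range(nb_strategies_j1):
--                 for y in range(nb_strategies_j2):
--                     if (x, y) == (i, j):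
--                         continue
--
--                     gain_xy = table_gains[x][y]
--
--                     # Si (x, y) est au moins aussi bon pour les 2 joueurs, et strictement meilleur pour l'un d'eux
--                     if (gain_xy[0] >= gain_ij[0] and gain_xy[1] >= gain_ij[1]) and (
--                         gain_xy[0] > gain_ij[0] or gain_xy[1] > gain_ij[1]
--                     ):
--                         est_domine = True
--                         break
--                 if est_domine:
--                     break
--
--             if not est_domine:
--                 pareto_optima.append((i, j))
--
--     return pareto_optima
-- ===== SOURCE B (Python) =====
-- def trouver_optimums_pareto(
--     table_gains: list[list[tuple[int, int]]],
-- ) -> list[tuple[int, int]]: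
--     nb_cols = len(table_gains[0])
--     vals = [row[j] for row in table_gains for j in range(nb_cols)]
--     # one descending lexicographic sort, then a linear sweep: a value is
--     # Pareto-optimal iff its second component beats every earlier one
--     front = set()
--     best = None
--     for v in sorted(vals, reverse=True):
--         if best is None or v[1] > best:
--             front.add(v)
--             best = v[1]
--     return [
--         (i, j)
--         for i in range(len(table_gains))
--         for j in range(nb_cols)
--         if table_gains[i][j] in front
--     ]
-- ===== Notes on version B (the rewrite author's own statement) =====
-- stated objective: faster
-- what changed: replaces the all-pairs domination scan (for every cell, rescan the whole matrix) by one flatten + one descending lexicographic sort + a linear prefix-max sweep that computes the Pareto front of values, then a single pass emits the cells in original order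
import Mathlib
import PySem

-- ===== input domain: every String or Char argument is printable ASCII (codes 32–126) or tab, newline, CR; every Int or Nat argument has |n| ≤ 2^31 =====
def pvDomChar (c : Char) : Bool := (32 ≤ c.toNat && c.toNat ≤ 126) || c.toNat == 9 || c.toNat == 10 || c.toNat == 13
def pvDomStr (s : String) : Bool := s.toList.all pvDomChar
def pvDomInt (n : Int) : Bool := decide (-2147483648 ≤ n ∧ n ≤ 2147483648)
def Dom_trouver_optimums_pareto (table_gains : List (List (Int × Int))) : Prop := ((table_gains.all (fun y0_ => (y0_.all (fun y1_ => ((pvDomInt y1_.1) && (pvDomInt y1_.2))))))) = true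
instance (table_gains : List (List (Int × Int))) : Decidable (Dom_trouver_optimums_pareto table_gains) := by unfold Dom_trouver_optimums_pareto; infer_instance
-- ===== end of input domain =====

-- B replaces A's all-pairs domination scan by flatten + one descending lexicographic
-- sort + a linear prefix-max sweep (Pareto front of values), then emits cells in
-- original order; objective: faster.

-- ===== PORT A =====
-- table_gains[x][y]  (defaults unreachable under Pre_)
def pvCellA (t : List (List (Int × Int))) (x y : Int) : Int × Int :=
  PySem.List.pyGetD (PySem.List.pyGetD t x []) y (0, 0)

-- the domination test in A's innermost branch
def pvCheckDomine (g_xy g_ij : Int × Int) : Bool :=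
  (decide (g_ij.1 ≤ g_xy.1) && decide (g_ij.2 ≤ g_xy.2)) &&
  (decide (g_ij.1 < g_xy.1) || decide (g_ij.2 < g_xy.2))

-- 'for y in range(...)' with continue on (x,y)==(i,j) and break (returning est_domine)
def pvA_loopY (t : List (List (Int × Int))) (gij : Int × Int) (i j x : Int) : List Int → Bool
  | [] => false
  | y :: ys =>
    if (x, y) = (i, j) then pvA_loopY t gij i j x ys
    else if pvCheckDomine (pvCellA t x y) gij then true
    else pvA_loopY t gij i j x ys

-- 'for x in range(...)' with break once est_domine is set
def pvA_loopX (t : List (List (Int × Int))) (gij : Int × Int) (i j nc : Int) : List Int → Bool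
  | [] => false
  | x :: xs =>
    if pvA_loopY t gij i j x (PySem.List.pyRange 0 nc 1) then true
    else pvA_loopX t gij i j nc xs

-- inner 'for j in range(...)' appending the non-dominated cells
def pvA_loopJ (t : List (List (Int × Int))) (n nc i : Int) : List Int → List (Int × Int) → List (Int × Int)
  | [], acc => acc
  | j :: js, acc =>
    if pvA_loopX t (pvCellA t i j) i j nc (PySem.List.pyRange 0 n 1) then
      pvA_loopJ t n nc i js acc
    else
      pvA_loopJ t n nc i js (acc ++ [(i, j)])

-- outer 'for i in range(...)'
def pvA_loopI (t : List (List (Int × Int))) (n nc : Int) : List Int → List (Int × Int) → List (Int × Int)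
  | [], acc => acc
  | i :: is_, acc => pvA_loopI t n nc is_ (pvA_loopJ t n nc i (PySem.List.pyRange 0 nc 1) acc)

def trouver_optimums_pareto (table_gains : List (List (Int × Int))) : List (Int × Int) :=
  let n : Int := (table_gains.length : Int)
  let nc : Int := ((PySem.List.pyGetD table_gains 0 []).length : Int)
  pvA_loopI table_gains n nc (PySem.List.pyRange 0 n 1) []

-- ===== PORT B =====
-- vals = [row[j] for row in table_gains for j in range(nb_cols)]
def pvVals (t : List (List (Int × Int))) (nc : Int) : List (Int × Int) :=
  t.flatMap (fun row => (PySem.List.pyRange 0 nc 1).map (fun j => PySem.List.pyGetD row j (0, 0)))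

-- the sweep loop: 'for v in sorted(vals, reverse=True): if best is None or v[1] > best: ...'
def pvB_sweep : List (Int × Int) → Option Int → PySem.Set (Int × Int) → PySem.Set (Int × Int)
  | [], _, f => f
  | v :: vs, best, f =>
    if best.all (fun m => decide (m < v.2)) then pvB_sweep vs (some v.2) (PySem.Set.add f v)
    else pvB_sweep vs best f

def trouver_optimums_pareto_alt (table_gains : List (List (Int × Int))) : List (Int × Int) :=
  let nc : Int := ((PySem.List.pyGetD table_gains 0 []).length : Int)
  -- Python compares tuples lexicographically, hence the toLex sort key
  let front : PySem.Set (Int × Int) :=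
    pvB_sweep (PySem.List.sorted (pvVals table_gains nc) (fun v => toLex v) true) none PySem.Set.empty
  (PySem.List.pyRange 0 (table_gains.length : Int) 1).flatMap (fun i =>
    ((PySem.List.pyRange 0 nc 1).filter
        (fun j => PySem.Set.contains front (PySem.List.pyGetD (PySem.List.pyGetD table_gains i []) j (0, 0)))).map (fun j => ((i : Int), j)))

-- ===== PRECONDITION & SPEC =====
-- Pre_ excludes exactly the inputs on which the Python A raises IndexError:
-- the empty table (len(table_gains[0])) and tables with a row shorter than the first row.
def Pre_trouver_optimums_pareto (table_gains : List (List (Int × Int))) : Prop :=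
  table_gains ≠ [] ∧ ∀ r ∈ table_gains, table_gains.headI.length ≤ r.length
instance (table_gains : List (List (Int × Int))) : Decidable (Pre_trouver_optimums_pareto table_gains) := by unfold Pre_trouver_optimums_pareto; infer_instance

def pvWitness_trouver_optimums_pareto : (List (List (Int × Int))) := [[(1, 2), (0, 0)], [(2, 1), (1, 1)]]

def Spec_trouver_optimums_pareto (table_gains : List (List (Int × Int))) (out : List (Int × Int)) : Prop := out = trouver_optimums_pareto_alt table_gains
instance (table_gains : List (List (Int × Int))) (out : List (Int × Int)) : Decidable (Spec_trouver_optimums_pareto table_gains out) := by unfold Spec_trouver_optimums_pareto; infer_instance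

-- ===== CLAIM (what is proved, stated in full; the proofs are below) =====
def Claim_equal_trouver_optimums_pareto : Prop := ∀ (table_gains : List (List (Int × Int))), Dom_trouver_optimums_pareto table_gains → Pre_trouver_optimums_pareto table_gains → Spec_trouver_optimums_pareto table_gains (trouver_optimums_pareto table_gains)

-- ===== LEMMAS AND PROOFS =====

lemma pvCheckDomine_irrefl (g : Int × Int) : pvCheckDomine g g = false := by
  simp [pvCheckDomine]

lemma pvCheckDomine_iff (w g : Int × Int) :
    pvCheckDomine w g = true ↔ (toLex g < toLex w ∧ g.2 ≤ w.2) := by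
  simp only [pvCheckDomine, Bool.and_eq_true, Bool.or_eq_true, decide_eq_true_eq,
    Prod.Lex.toLex_lt_toLex]
  omega

lemma pvA_loopY_iff (t : List (List (Int × Int))) (gij : Int × Int) (i j x : Int)
    (ys : List Int) :
    pvA_loopY t gij i j x ys = true ↔
      ∃ y ∈ ys, ¬((x, y) = (i, j)) ∧ pvCheckDomine (pvCellA t x y) gij = true := by
  induction ys with
  | nil => simp [pvA_loopY]
  | cons y ys ih =>
    simp only [pvA_loopY]
    split_ifs with h1 h2 <;> simp_all

lemma pvA_loopX_iff (t : List (List (Int × Int))) (gij : Int × Int) (i j nc : Int)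
    (xs : List Int) :
    pvA_loopX t gij i j nc xs = true ↔
      ∃ x ∈ xs, pvA_loopY t gij i j x (PySem.List.pyRange 0 nc 1) = true := by
  induction xs with
  | nil => simp [pvA_loopX]
  | cons x xs ih =>
    simp only [pvA_loopX]
    split_ifs with h1 <;> simp_all

lemma pvA_loopJ_eq (t : List (List (Int × Int))) (n nc i : Int) (js : List Int) :
    ∀ acc, pvA_loopJ t n nc i js acc =
      acc ++ (js.filter
          (fun j => !pvA_loopX t (pvCellA t i j) i j nc (PySem.List.pyRange 0 n 1))).map
        (fun j => (i, j)) := by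
  induction js with
  | nil => intro acc; simp [pvA_loopJ]
  | cons j js ih =>
    intro acc
    simp only [pvA_loopJ, List.filter_cons]
    by_cases h : pvA_loopX t (pvCellA t i j) i j nc (PySem.List.pyRange 0 n 1) = true
    · simp [h, ih]
    · simp only [Bool.not_eq_true] at *
      simp [h, ih]

lemma pvA_loopI_eq (t : List (List (Int × Int))) (n nc : Int) (is_ : List Int) :
    ∀ acc, pvA_loopI t n nc is_ acc =
      acc ++ is_.flatMap (fun i =>
        ((PySem.List.pyRange 0 nc 1).filter
            (fun j => !pvA_loopX t (pvCellA t i j) i j nc (PySem.List.pyRange 0 n 1))).map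
          (fun j => (i, j))) := by
  induction is_ with
  | nil => intro acc; simp [pvA_loopI]
  | cons i is_ ih =>
    intro acc
    simp only [pvA_loopI, List.flatMap_cons, ih, pvA_loopJ_eq, List.append_assoc]

lemma mem_pvVals (t : List (List (Int × Int))) (nc : Int) (w : Int × Int) :
    w ∈ pvVals t nc ↔
      ∃ row ∈ t, ∃ y ∈ PySem.List.pyRange 0 nc 1, PySem.List.pyGetD row y (0, 0) = w := by
  simp [pvVals]

lemma row_mem_iff (t : List (List (Int × Int))) (row : List (Int × Int)) :
    row ∈ t ↔ ∃ x ∈ PySem.List.pyRange 0 (t.length : Int) 1, PySem.List.pyGetD t x [] = row := by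
  constructor
  · intro h
    obtain ⟨k, hk, hget⟩ := List.mem_iff_getElem.mp h
    refine ⟨(k : Int), ?_, ?_⟩
    · rw [PySem.List.mem_pyRange_one]; omega
    · rw [PySem.List.pyGetD_eq_getElem t [] (by omega) (by exact_mod_cast hk)]
      simpa using hget
  · rintro ⟨x, hx, rfl⟩
    rw [PySem.List.mem_pyRange_one] at hx
    rw [PySem.List.pyGetD_eq_getElem t [] hx.1 (by exact_mod_cast hx.2)]
    exact List.getElem_mem _

lemma cell_mem_pvVals (t : List (List (Int × Int))) (nc i j : Int)
    (hi : i ∈ PySem.List.pyRange 0 (t.length : Int) 1) (hj : j ∈ PySem.List.pyRange 0 nc 1) :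
    pvCellA t i j ∈ pvVals t nc := by
  rw [mem_pvVals]
  exact ⟨PySem.List.pyGetD t i [], (row_mem_iff t _).mpr ⟨i, hi, rfl⟩, j, hj, rfl⟩

lemma pvA_est_iff (t : List (List (Int × Int))) (nc i j : Int) :
    pvA_loopX t (pvCellA t i j) i j nc (PySem.List.pyRange 0 (t.length : Int) 1) = true ↔
      ∃ w ∈ pvVals t nc, pvCheckDomine w (pvCellA t i j) = true := by
  rw [pvA_loopX_iff]
  constructor
  · rintro ⟨x, hx, hy⟩
    rw [pvA_loopY_iff] at hy
    obtain ⟨y, hyr, _, hdom⟩ := hy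
    exact ⟨pvCellA t x y, cell_mem_pvVals t nc x y hx hyr, hdom⟩
  · rintro ⟨w, hw, hdom⟩
    rw [mem_pvVals] at hw
    obtain ⟨row, hrow, y, hy, hval⟩ := hw
    obtain ⟨x, hx, hgx⟩ := (row_mem_iff t row).mp hrow
    have hcell : pvCellA t x y = w := by rw [pvCellA, hgx, hval]
    by_cases hxy : (x, y) = (i, j)
    · exfalso
      rw [Prod.mk.injEq] at hxy
      obtain ⟨rfl, rfl⟩ := hxy
      rw [hcell, pvCheckDomine_irrefl] at hdom
      exact Bool.false_ne_true hdom
    · exact ⟨x, hx, (pvA_loopY_iff t _ i j x _).mpr ⟨y, hy, hxy, by rw [hcell]; exact hdom⟩⟩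

lemma mem_pvB_sweep (L : List (Int × Int))
    (hL : L.Pairwise (fun a b => toLex b ≤ toLex a)) :
    ∀ (b : Option Int) (f : PySem.Set (Int × Int)) (v : Int × Int),
      v ∈ pvB_sweep L b f ↔
        v ∈ f ∨ (v ∈ L ∧ (b.all (fun m => decide (m < v.2))) = true ∧
          ∀ w ∈ L, toLex v < toLex w → w.2 < v.2) := by
  induction L with
  | nil => intro b f v; simp [pvB_sweep]
  | cons h tL ih =>
    rw [List.pairwise_cons] at hL
    intro b f v
    simp only [pvB_sweep]
    by_cases hc : (b.all (fun m => decide (m < h.2))) = true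
    · rw [if_pos hc, ih hL.2]
      constructor
      · rintro (hf | ⟨hvt, hlt, hall⟩)
        · rw [PySem.Set.mem_add] at hf
          rcases hf with hf | rfl
          · exact Or.inl hf
          · refine Or.inr ⟨List.mem_cons_self, hc, ?_⟩
            intro w hw hlt
            rcases List.mem_cons.mp hw with rfl | hw
            · exact absurd hlt (lt_irrefl _)
            · exact absurd (lt_of_lt_of_le hlt (hL.1 w hw)) (lt_irrefl _)
        · simp only [Option.all_some, decide_eq_true_eq] at hlt
          refine Or.inr ⟨List.mem_cons_of_mem _ hvt, ?_, ?_⟩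
          · cases b with
            | none => rfl
            | some m =>
              simp only [Option.all_some, decide_eq_true_eq] at hc ⊢
              omega
          · intro w hw hwlt
            rcases List.mem_cons.mp hw with rfl | hw
            · exact hlt
            · exact hall w hw hwlt
      · rintro (hf | ⟨hvl, hlt, hall⟩)
        · exact Or.inl ((PySem.Set.mem_add _ _ _).mpr (Or.inl hf))
        · by_cases hveq : v = h
          · exact Or.inl ((PySem.Set.mem_add _ _ _).mpr (Or.inr hveq))
          · have hvt : v ∈ tL := (List.mem_cons.mp hvl).resolve_left hveq
            have hvh : toLex v ≤ toLex h := hL.1 v hvt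
            have hlt' : toLex v < toLex h :=
              lt_of_le_of_ne hvh (fun e => hveq (toLex.injective e))
            have hh2 : h.2 < v.2 := hall h List.mem_cons_self hlt'
            refine Or.inr ⟨hvt, ?_, fun w hw hwlt => hall w (List.mem_cons_of_mem _ hw) hwlt⟩
            simpa using hh2
    · rw [if_neg hc, ih hL.2]
      have hbm : ∃ m, b = some m ∧ ¬ (m < h.2) := by
        cases b with
        | none => simp at hc
        | some m => exact ⟨m, rfl, by simpa using hc⟩
      obtain ⟨m, rfl, hm⟩ := hbm
      constructor
      · rintro (hf | ⟨hvt, hlt, hall⟩)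
        · exact Or.inl hf
        · simp only [Option.all_some, decide_eq_true_eq] at hlt
          refine Or.inr ⟨List.mem_cons_of_mem _ hvt, by simpa using hlt, ?_⟩
          intro w hw hwlt
          rcases List.mem_cons.mp hw with rfl | hw
          · omega
          · exact hall w hw hwlt
      · rintro (hf | ⟨hvl, hlt, hall⟩)
        · exact Or.inl hf
        · simp only [Option.all_some, decide_eq_true_eq] at hlt
          rcases List.mem_cons.mp hvl with rfl | hvt
          · omega
          · exact Or.inr ⟨hvt, by simpa using hlt,
              fun w hw hwlt => hall w (List.mem_cons_of_mem _ hw) hwlt⟩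

lemma mem_front_iff (vals : List (Int × Int)) (v : Int × Int) :
    v ∈ pvB_sweep (PySem.List.sorted vals (fun v => toLex v) true) none PySem.Set.empty ↔
      v ∈ vals ∧ ∀ w ∈ vals, toLex v < toLex w → w.2 < v.2 := by
  have hpair := PySem.List.sorted_pairwise_rev vals (fun v => toLex v)
  rw [mem_pvB_sweep _ hpair]
  simp only [PySem.Set.empty, List.not_mem_nil, false_or, Option.all_none]
  constructor
  · rintro ⟨hv, _, hall⟩
    exact ⟨(PySem.List.mem_sorted _ _ _ _).mp hv,
      fun w hw => hall w ((PySem.List.mem_sorted _ _ _ _).mpr hw)⟩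
  · rintro ⟨hv, hall⟩
    exact ⟨(PySem.List.mem_sorted _ _ _ _).mpr hv, trivial,
      fun w hw => hall w ((PySem.List.mem_sorted _ _ _ _).mp hw)⟩

lemma keep_iff (t : List (List (Int × Int))) (nc i j : Int)
    (hi : i ∈ PySem.List.pyRange 0 (t.length : Int) 1) (hj : j ∈ PySem.List.pyRange 0 nc 1) :
    (!pvA_loopX t (pvCellA t i j) i j nc (PySem.List.pyRange 0 (t.length : Int) 1)) =
      PySem.Set.contains
        (pvB_sweep (PySem.List.sorted (pvVals t nc) (fun v => toLex v) true) none PySem.Set.empty)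
        (PySem.List.pyGetD (PySem.List.pyGetD t i []) j (0, 0)) := by
  have hcell : PySem.List.pyGetD (PySem.List.pyGetD t i []) j (0, 0) = pvCellA t i j := rfl
  rw [Bool.eq_iff_iff, Bool.not_eq_true', ← Bool.not_eq_true, hcell]
  rw [PySem.Set.contains_iff, mem_front_iff, pvA_est_iff]
  constructor
  · intro hne
    refine ⟨cell_mem_pvVals t nc i j hi hj, fun w hw hlt => ?_⟩
    by_contra hle
    exact hne ⟨w, hw, (pvCheckDomine_iff w _).mpr ⟨hlt, by omega⟩⟩
  · rintro ⟨_, hall⟩ ⟨w, hw, hdom⟩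
    rw [pvCheckDomine_iff] at hdom
    exact absurd (hall w hw hdom.1) (by omega)

lemma flatMap_congr_mem {α β : Type} (l : List α) (f g : α → List β)
    (h : ∀ a ∈ l, f a = g a) : l.flatMap f = l.flatMap g := by
  induction l with
  | nil => rfl
  | cons a l ih =>
    simp only [List.flatMap_cons, h a List.mem_cons_self,
      ih (fun x hx => h x (List.mem_cons_of_mem a hx))]

-- ===== VERDICT (by name: the statement is the Claim_ definition above) =====
theorem trouver_optimums_pareto_spec : Claim_equal_trouver_optimums_pareto := by
  intro t _ _
  show trouver_optimums_pareto t = trouver_optimums_pareto_alt t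
  simp only [trouver_optimums_pareto, trouver_optimums_pareto_alt]
  rw [pvA_loopI_eq, List.nil_append]
  apply flatMap_congr_mem
  intro i hi
  congr 1
  apply List.filter_congr
  intro j hj
  exact keep_iff t _ i j hi hj
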